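-- pv_equiv track=rewrite | github.com/cspoppuppy/Utilities | Web Scrape (NoReq).py | GetCustomerAttributes
-- ===== SOURCE A (Python) =====
-- def GetCustomerAttributes(l):
--     user_cases=[]
--     industry=[]
--     location=[]
--     products=[]
--     for i in l:
--         # User Case
--         if i[0:23]=="data-use_cases_applied-":
--             user_cases.append(i.replace("data-use_cases_applied-",""))
--         # Industry
--         elif i[0:25]=="data-industry_categories-":
--             industry.append(i.replace("data-industry_categories-",""))
--         # Location
--         elif i[0:21]=="data-location_region-":
--             location.append(i.replace("data-location_region-",""))
--         # Products
--         elif i[0:19]=="data-products_used-":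
--             products.append(i.replace("data-products_used-",""))
--     return [user_cases, industry, location, products]
-- ===== SOURCE B (Python) =====
-- def _pick(l, prefix, n):
--     return [x.replace(prefix, "") for x in l if x[0:n] == prefix]
--
-- def GetCustomerAttributes(l):
--     return [_pick(l, "data-use_cases_applied-", 23),
--             _pick(l, "data-industry_categories-", 25),
--             _pick(l, "data-location_region-", 21),
--             _pick(l, "data-products_used-", 19)]
-- ===== Notes on version B (the rewrite author's own statement) =====
-- stated objective: simpler
-- what changed: Replaced the single loop with four accumulators and an if/elif dispatch by four independent filtered scans (one comprehension per prefix); correctness rests on the four prefixes being mutually exclusive.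
import Mathlib
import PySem

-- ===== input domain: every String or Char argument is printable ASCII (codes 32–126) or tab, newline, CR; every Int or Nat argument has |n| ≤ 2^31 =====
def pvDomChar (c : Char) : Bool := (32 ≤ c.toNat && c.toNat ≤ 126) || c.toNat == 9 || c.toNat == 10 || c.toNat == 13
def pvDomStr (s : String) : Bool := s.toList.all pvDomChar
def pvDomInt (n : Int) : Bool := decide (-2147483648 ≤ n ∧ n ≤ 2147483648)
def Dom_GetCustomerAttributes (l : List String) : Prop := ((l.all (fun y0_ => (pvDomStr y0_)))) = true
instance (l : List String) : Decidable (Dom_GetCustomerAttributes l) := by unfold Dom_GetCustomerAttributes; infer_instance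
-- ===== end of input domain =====

-- B replaces A's single loop with if/elif dispatch into four accumulators by four
-- independent filtered scans, one per prefix (objective: simpler).

-- ===== PORT A =====
-- literal port: one fold over l carrying the four accumulator lists, if/elif chain
def GetCustomerAttributes (l : List String) : List (List String) :=
  let s := l.foldl
    (fun (acc : List String × List String × List String × List String) i =>
      let (u, ind, lo, p) := acc
      if PySem.Str.slice i (some 0) (some 23) = "data-use_cases_applied-" then
        (u ++ [PySem.Str.replace i "data-use_cases_applied-" ""], ind, lo, p)
      else if PySem.Str.slice i (some 0) (some 25) = "data-industry_categories-" then
        (u, ind ++ [PySem.Str.replace i "data-industry_categories-" ""], lo, p)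
      else if PySem.Str.slice i (some 0) (some 21) = "data-location_region-" then
        (u, ind, lo ++ [PySem.Str.replace i "data-location_region-" ""], p)
      else if PySem.Str.slice i (some 0) (some 19) = "data-products_used-" then
        (u, ind, lo, p ++ [PySem.Str.replace i "data-products_used-" ""])
      else acc)
    ([], [], [], [])
  [s.1, s.2.1, s.2.2.1, s.2.2.2]

-- ===== PORT B =====
-- helper _pick of Source B: one filtered scan for one prefix
def pvPick (l : List String) (prefix_ : String) (n : Int) : List String :=
  (l.filter (fun x => PySem.Str.slice x (some 0) (some n) = prefix_)).map
    (fun x => PySem.Str.replace x prefix_ "")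

def GetCustomerAttributes_alt (l : List String) : List (List String) :=
  [pvPick l "data-use_cases_applied-" 23,
   pvPick l "data-industry_categories-" 25,
   pvPick l "data-location_region-" 21,
   pvPick l "data-products_used-" 19]

-- ===== PRECONDITION & SPEC =====
def Spec_GetCustomerAttributes (l : List String) (out : List (List String)) : Prop := out = GetCustomerAttributes_alt l
instance (l : List String) (out : List (List String)) : Decidable (Spec_GetCustomerAttributes l out) := by unfold Spec_GetCustomerAttributes; infer_instance

-- ===== CLAIM (what is proved, stated in full; the proofs are below) =====
def Claim_equal_GetCustomerAttributes : Prop := ∀ (l : List String), Dom_GetCustomerAttributes l → Spec_GetCustomerAttributes l (GetCustomerAttributes l)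

-- ===== LEMMAS AND PROOFS =====

-- s[0:n] == p is a statement about the first n characters
lemma slice_eq_iff (s p : String) (n : Nat) :
    (PySem.Str.slice s (some 0) (some (n : Int)) = p) ↔ s.toList.take n = p.toList := by
  rw [← String.toList_inj, PySem.Str.toList_slice, PySem.Chars.slice_eq_listSlice]
  rw [show (0:Int) = ((0:Nat):Int) from rfl, PySem.List.slice_toNat]
  · simp
  · exact Int.natCast_nonneg 0
  · exact Int.natCast_nonneg n

-- a matched prefix of length m rules out a conflicting prefix of length k ≤ m
lemma take_ne_of_take_eq (cs : List Char) (m k : Nat) (a b : List Char)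
    (hk : k ≤ m) (hab : a.take k ≠ b) (h : cs.take m = a) : cs.take k ≠ b := by
  intro h'
  apply hab
  have : (cs.take m).take k = cs.take k := by
    rw [List.take_take]; congr 1; omega
  rw [h, h'] at this
  exact this

-- one step of B's scan
lemma pvPick_cons (x : String) (xs : List String) (pfx : String) (n : Nat) :
    pvPick (x :: xs) pfx (n : Int)
      = (if x.toList.take n = pfx.toList then [PySem.Str.replace x pfx ""] else [])
          ++ pvPick xs pfx (n : Int) := by
  simp only [pvPick, List.filter_cons, decide_eq_true_eq, slice_eq_iff]
  split_ifs with h <;> simp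

lemma loop_lemma (l : List String) (u ind lo p : List String) :
    l.foldl
      (fun (acc : List String × List String × List String × List String) i =>
        let (u, ind, lo, p) := acc
        if PySem.Str.slice i (some 0) (some 23) = "data-use_cases_applied-" then
          (u ++ [PySem.Str.replace i "data-use_cases_applied-" ""], ind, lo, p)
        else if PySem.Str.slice i (some 0) (some 25) = "data-industry_categories-" then
          (u, ind ++ [PySem.Str.replace i "data-industry_categories-" ""], lo, p)
        else if PySem.Str.slice i (some 0) (some 21) = "data-location_region-" then
          (u, ind, lo ++ [PySem.Str.replace i "data-location_region-" ""], p)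
        else if PySem.Str.slice i (some 0) (some 19) = "data-products_used-" then
          (u, ind, lo, p ++ [PySem.Str.replace i "data-products_used-" ""])
        else acc)
      (u, ind, lo, p)
    = (u ++ pvPick l "data-use_cases_applied-" 23,
       ind ++ pvPick l "data-industry_categories-" 25,
       lo ++ pvPick l "data-location_region-" 21,
       p ++ pvPick l "data-products_used-" 19) := by
  induction l generalizing u ind lo p with
  | nil => simp [pvPick]
  | cons x xs IH =>
    have e1 := pvPick_cons x xs "data-use_cases_applied-" 23
    have e2 := pvPick_cons x xs "data-industry_categories-" 25
    have e3 := pvPick_cons x xs "data-location_region-" 21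
    have e4 := pvPick_cons x xs "data-products_used-" 19
    have c1 := slice_eq_iff x "data-use_cases_applied-" 23
    have c2 := slice_eq_iff x "data-industry_categories-" 25
    have c3 := slice_eq_iff x "data-location_region-" 21
    have c4 := slice_eq_iff x "data-products_used-" 19
    simp only [Nat.cast_ofNat] at e1 e2 e3 e4 c1 c2 c3 c4
    simp only [List.foldl_cons]
    rw [e1, e2, e3, e4]
    by_cases h1 : x.toList.take 23 = "data-use_cases_applied-".toList
    · have n2 : ¬ x.toList.take 25 = "data-industry_categories-".toList := fun h' =>
        take_ne_of_take_eq x.toList 25 23 _ _ (by omega) (by decide) h' h1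
      have n3 := take_ne_of_take_eq x.toList 23 21 _ "data-location_region-".toList (by omega) (by decide) h1
      have n4 := take_ne_of_take_eq x.toList 23 19 _ "data-products_used-".toList (by omega) (by decide) h1
      rw [if_pos h1, if_neg n2, if_neg n3, if_neg n4, if_pos (c1.mpr h1), IH]
      simp
    · rw [if_neg (fun h => h1 (c1.mp h))]
      by_cases h2 : x.toList.take 25 = "data-industry_categories-".toList
      · have n3 := take_ne_of_take_eq x.toList 25 21 _ "data-location_region-".toList (by omega) (by decide) h2
        have n4 := take_ne_of_take_eq x.toList 25 19 _ "data-products_used-".toList (by omega) (by decide) h2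
        rw [if_neg h1, if_pos h2, if_neg n3, if_neg n4, if_pos (c2.mpr h2), IH]
        simp
      · rw [if_neg (fun h => h2 (c2.mp h))]
        by_cases h3 : x.toList.take 21 = "data-location_region-".toList
        · have n4 := take_ne_of_take_eq x.toList 21 19 _ "data-products_used-".toList (by omega) (by decide) h3
          rw [if_neg h1, if_neg h2, if_pos h3, if_neg n4, if_pos (c3.mpr h3), IH]
          simp
        · rw [if_neg (fun h => h3 (c3.mp h))]
          by_cases h4 : x.toList.take 19 = "data-products_used-".toList
          · rw [if_neg h1, if_neg h2, if_neg h3, if_pos h4, if_pos (c4.mpr h4), IH]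
            simp
          · rw [if_neg h1, if_neg h2, if_neg h3, if_neg h4, if_neg (fun h => h4 (c4.mp h)), IH]
            simp

-- ===== VERDICT (by name: the statement is the Claim_ definition above) =====
theorem GetCustomerAttributes_spec : Claim_equal_GetCustomerAttributes := by
  intro l _
  unfold Spec_GetCustomerAttributes GetCustomerAttributes GetCustomerAttributes_alt
  rw [loop_lemma]
  simp
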